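-- pv_equiv track=rewrite | github.com/iasawseen/myo | auto_testing/processing/preprocess.py | _get_consecutive_none_lengths
-- ===== SOURCE A (Python) =====
-- def _get_consecutive_none_lengths(iterable):
--     none_lengths = []
--     empty_start = 0
--     empty_open = False
--
--     for i, el in enumerate(iterable):
--         if el is None:
--             if not empty_open:
--                 empty_open = True
--                 empty_start = i
--         else:
--             if empty_open:
--                 empty_open = False
--                 empty_end = i
--                 none_lengths.append(empty_end - empty_start)
--
--     if empty_open:
--         none_lengths.append(len(iterable) - empty_start)
--
--     return none_lengths
-- ===== SOURCE B (Python) =====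
-- def _get_consecutive_none_lengths(iterable):
--     runs = []
--     for x in iterable:
--         k = x is None
--         if runs and runs[-1][0] == k:
--             runs[-1][1] += 1
--         else:
--             runs.append([k, 1])
--     return [n for k, n in runs if k]
-- ===== Notes on version B (the rewrite author's own statement) =====
-- stated objective: alternative
-- what changed: B first run-length-encodes the whole sequence into (is_none, count) runs and then filters out the lengths of the None runs, replacing A's open-flag/start-index state machine with its separate trailing-run branch.
import Mathlib
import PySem

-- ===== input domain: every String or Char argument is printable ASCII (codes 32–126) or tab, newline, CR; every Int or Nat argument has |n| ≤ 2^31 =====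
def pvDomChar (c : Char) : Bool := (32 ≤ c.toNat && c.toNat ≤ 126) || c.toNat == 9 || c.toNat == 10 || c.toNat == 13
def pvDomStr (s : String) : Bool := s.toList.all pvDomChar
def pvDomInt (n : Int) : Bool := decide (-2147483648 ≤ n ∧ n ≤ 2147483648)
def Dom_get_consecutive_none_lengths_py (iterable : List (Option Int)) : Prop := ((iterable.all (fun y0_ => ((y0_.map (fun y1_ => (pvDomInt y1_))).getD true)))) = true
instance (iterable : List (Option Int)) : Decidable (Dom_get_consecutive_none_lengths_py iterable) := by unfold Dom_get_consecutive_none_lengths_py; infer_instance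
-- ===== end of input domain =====

-- B run-length-encodes the whole sequence into (is_none, count) runs and then filters
-- out the None runs' lengths, instead of A's open-flag/start-index state machine with
-- its separate trailing-run branch (objective: alternative).

-- ===== PORT A =====
-- A's for-loop as recursion: i = current index, acc = none_lengths,
-- start = empty_start, opn = empty_open; at the end i = len(iterable)
def pvALoop : List (Option Int) → Int → List Int → Int → Bool → List Int
  | [], i, acc, start, opn => if opn then acc ++ [i - start] else acc
  | el :: xs, i, acc, start, opn =>
    match el with
    | none => if opn then pvALoop xs (i + 1) acc start true
              else pvALoop xs (i + 1) acc i true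
    | some _ => if opn then pvALoop xs (i + 1) (acc ++ [i - start]) start false
                else pvALoop xs (i + 1) acc start false

def get_consecutive_none_lengths_py (iterable : List (Option Int)) : List Int :=
  pvALoop iterable 0 [] 0 false

-- ===== PORT B =====
-- B's loop body: extend the last run if it has the same None-status, else open a new run
def pvRunsStep (runs : List (Bool × Int)) (x : Option Int) : List (Bool × Int) :=
  let k := x.isNone
  match runs.getLast? with
  | some (k', n) => if k' == k then runs.dropLast ++ [(k', n + 1)] else runs ++ [(k, 1)]
  | none => runs ++ [(k, 1)]

def pvRuns (iterable : List (Option Int)) : List (Bool × Int) :=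
  iterable.foldl pvRunsStep []

def get_consecutive_none_lengths_py_alt (iterable : List (Option Int)) : List Int :=
  (pvRuns iterable).filterMap (fun p => if p.1 then some p.2 else none)

-- ===== PRECONDITION & SPEC =====
def Spec_get_consecutive_none_lengths_py (iterable : List (Option Int)) (out : List Int) : Prop := out = get_consecutive_none_lengths_py_alt iterable
instance (iterable : List (Option Int)) (out : List Int) : Decidable (Spec_get_consecutive_none_lengths_py iterable out) := by unfold Spec_get_consecutive_none_lengths_py; infer_instance

-- ===== CLAIM (what is proved, stated in full; the proofs are below) =====
def Claim_equal_get_consecutive_none_lengths_py : Prop := ∀ (iterable : List (Option Int)), Dom_get_consecutive_none_lengths_py iterable → Spec_get_consecutive_none_lengths_py iterable (get_consecutive_none_lengths_py iterable)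

-- ===== LEMMAS AND PROOFS =====
-- reference form of B's fold: one open run (k, n) absorbing the rest of the list
def pvExtend : Bool → Int → List (Option Int) → List (Bool × Int)
  | k, n, [] => [(k, n)]
  | k, n, x :: xs => if x.isNone == k then pvExtend k (n + 1) xs else (k, n) :: pvExtend x.isNone 1 xs

def pvG (ys : List (Bool × Int)) : List Int :=
  ys.filterMap (fun p => if p.1 then some p.2 else none)

theorem pvFold_eq (ys : List (Option Int)) : ∀ (acc : List (Bool × Int)) (k : Bool) (n : Int),
    List.foldl pvRunsStep (acc ++ [(k, n)]) ys = acc ++ pvExtend k n ys := by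
  induction ys with
  | nil => intro acc k n; simp [pvExtend]
  | cons x xs ih =>
    intro acc k n
    by_cases h : x.isNone = k
    · have hstep : pvRunsStep (acc ++ [(k, n)]) x = acc ++ [(k, n + 1)] := by
        simp [pvRunsStep, h]
      simp only [List.foldl_cons, hstep, ih, pvExtend, h, beq_self_eq_true, if_true]
    · have h' : ¬ k = x.isNone := fun hh => h hh.symm
      have hstep : pvRunsStep (acc ++ [(k, n)]) x = (acc ++ [(k, n)]) ++ [(x.isNone, 1)] := by
        simp [pvRunsStep, h']
      rw [List.foldl_cons, hstep, ih]
      simp [pvExtend, h]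
  
theorem pvRuns_cons (x : Option Int) (xs : List (Option Int)) :
    pvRuns (x :: xs) = pvExtend x.isNone 1 xs := by
  have h0 : pvRunsStep [] x = [] ++ [(x.isNone, 1)] := by simp [pvRunsStep]
  simpa [pvRuns, h0] using pvFold_eq xs [] x.isNone 1

theorem pvG_extend_false (ys : List (Option Int)) : ∀ (n : Int),
    pvG (pvExtend false n ys) = pvG (pvRuns ys) := by
  induction ys with
  | nil => intro n; simp [pvExtend, pvRuns, pvG]
  | cons x xs ih =>
    intro n
    by_cases h : x.isNone
    · simp [pvExtend, h, pvG, pvRuns_cons]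
    · have hx : x.isNone = false := by cases x <;> simp_all
      rw [show pvExtend false n (x :: xs) = pvExtend false (n + 1) xs from by
          simp [pvExtend, hx], ih, pvRuns_cons, hx, ih 1]

-- single loop invariant covering both flag states of A's loop
theorem pvALoop_eq (xs : List (Option Int)) : ∀ (i : Int) (acc : List Int) (s : Int) (opn : Bool),
    pvALoop xs i acc s opn =
      acc ++ (if opn then pvG (pvExtend true (i - s) xs) else pvG (pvRuns xs)) := by
  induction xs with
  | nil =>
    intro i acc s opn
    cases opn <;> simp [pvALoop, pvRuns, pvExtend, pvG]
  | cons el xs ih =>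
    intro i acc s opn
    match el with
    | none =>
      cases opn with
      | false =>
        rw [show pvALoop (none :: xs) i acc s false = pvALoop xs (i + 1) acc i true from rfl,
          ih (i + 1) acc i true, pvRuns_cons]
        have : i + 1 - i = (1 : Int) := by ring
        simp [this]
      | true =>
        rw [show pvALoop (none :: xs) i acc s true = pvALoop xs (i + 1) acc s true from rfl,
          ih (i + 1) acc s true]
        have : i + 1 - s = i - s + 1 := by ring
        simp [this, pvExtend]
    | some a =>
      cases opn with
      | false =>
        rw [show pvALoop (some a :: xs) i acc s false = pvALoop xs (i + 1) acc s false from rfl,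
          ih (i + 1) acc s false, pvRuns_cons]
        simp [pvG_extend_false]
      | true =>
        rw [show pvALoop (some a :: xs) i acc s true = pvALoop xs (i + 1) (acc ++ [i - s]) s false from rfl,
          ih (i + 1) (acc ++ [i - s]) s false]
        simp [pvExtend, pvG]
        rw [← pvG, ← pvG, pvG_extend_false]

-- ===== VERDICT (by name: the statement is the Claim_ definition above) =====
theorem get_consecutive_none_lengths_py_spec : Claim_equal_get_consecutive_none_lengths_py := by
  intro iterable _
  unfold Spec_get_consecutive_none_lengths_py get_consecutive_none_lengths_py
    get_consecutive_none_lengths_py_alt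
  have := pvALoop_eq iterable 0 [] 0 false
  simpa [pvG] using this
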